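-- pv_equiv track=rewrite | github.com/noxthot/google_codejam_2022_04 | 0_qualification/E3.py | getLongestStraight
-- ===== SOURCE A (Python) =====
-- def getLongestStraight(n, s):
--     s_sorted = s.copy()
--     s_sorted.sort()
--     l = 0
--
--     for sides_die in s_sorted:
--         if sides_die > l:
--             l += 1
--
--     return l
-- ===== SOURCE B (Python) =====
-- def getLongestStraight(n, s):
--     # Sort-free counting approach: clamp side counts to len(s), tally them in
--     # a dict, then one greedy pass over the values 1..len(s).
--     m = len(s)
--     keys = [min(side, m) for side in s if side >= 1]
--     cnt = {}
--     for k in keys: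
--         cnt[k] = cnt.get(k, 0) + 1
--     l = 0
--     for v in range(1, m + 1):
--         l = min(v, l + cnt.get(v, 0))
--     return l
-- ===== Notes on version B (the rewrite author's own statement) =====
-- stated objective: alternative
-- what changed: Replaced copy+sort followed by a scan with a sort-free counting algorithm: sides are clamped to len(s), tallied in a dict in one pass, and the answer comes from a single greedy sweep over the values 1..len(s); linear-time in principle, though CPython's C sort makes A comparably fast in practice.
import Mathlib
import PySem

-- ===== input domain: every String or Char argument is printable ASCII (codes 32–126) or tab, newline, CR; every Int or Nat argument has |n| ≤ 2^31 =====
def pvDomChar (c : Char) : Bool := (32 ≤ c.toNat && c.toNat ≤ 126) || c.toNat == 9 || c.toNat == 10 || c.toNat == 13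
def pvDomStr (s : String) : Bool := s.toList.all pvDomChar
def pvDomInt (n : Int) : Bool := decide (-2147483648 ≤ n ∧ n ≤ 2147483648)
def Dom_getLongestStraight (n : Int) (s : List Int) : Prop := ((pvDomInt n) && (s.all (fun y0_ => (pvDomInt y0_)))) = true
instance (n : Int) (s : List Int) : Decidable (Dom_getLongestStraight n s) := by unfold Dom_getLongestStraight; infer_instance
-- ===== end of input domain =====

-- B replaces sort-then-scan by a counting pass (sides clamped to len(s)) and one
-- greedy sweep over the values 1..len(s): a genuinely different, sort-free algorithm.

-- ===== PORT A =====
def getLongestStraight (n : Int) (s : List Int) : Int :=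
  -- s_sorted = s.copy(); s_sorted.sort()
  let s_sorted := PySem.List.sorted s (fun x => x) false
  -- l = 0; for sides_die in s_sorted: if sides_die > l: l += 1
  s_sorted.foldl (fun l sides_die => if sides_die > l then l + 1 else l) 0

-- ===== PORT B =====
def getLongestStraight_alt (n : Int) (s : List Int) : Int :=
  let m : Int := (s.length : Int)
  -- keys = [min(side, m) for side in s if side >= 1]
  let keys := (s.filter (fun side => decide (1 ≤ side))).map (fun side => min side m)
  -- cnt = {}; for k in keys: cnt[k] = cnt.get(k, 0) + 1
  let cnt := keys.foldl (fun d k => d.modify k 0 (fun x => x + 1)) (PySem.Dict.empty : PySem.Dict Int Int)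
  -- l = 0; for v in range(1, m+1): l = min(v, l + cnt.get(v, 0))
  (PySem.List.pyRange 1 (m + 1) 1).foldl (fun l v => min v (l + cnt.getD v 0)) 0

-- ===== PRECONDITION & SPEC =====
def Spec_getLongestStraight (n : Int) (s : List Int) (out : Int) : Prop := out = getLongestStraight_alt n s
instance (n : Int) (s : List Int) (out : Int) : Decidable (Spec_getLongestStraight n s out) := by unfold Spec_getLongestStraight; infer_instance

-- ===== CLAIM (what is proved, stated in full; the proofs are below) =====
def Claim_equal_getLongestStraight : Prop := ∀ (n : Int) (s : List Int), Dom_getLongestStraight n s → Spec_getLongestStraight n s (getLongestStraight n s)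

-- ===== LEMMAS AND PROOFS =====

-- A's loop as a function: fold of "if x > l then l+1 else l"
def pvFA (xs : List Int) (l : Int) : Int :=
  xs.foldl (fun l x => if x > l then l + 1 else l) l

-- blocks of the sorted clamped list: for v = 1..b-1, (count of v) copies of v
def pvBlocks (u : List Int) (b : Int) : List Int :=
  (PySem.List.pyRange 1 b 1).flatMap (fun v => List.replicate (u.count v) v)

-- B's greedy sweep as a function of the counts
def pvBf (u : List Int) (b : Int) : Int :=
  (PySem.List.pyRange 1 b 1).foldl (fun l v => min v (l + (u.count v : Int))) 0

theorem pvFA_append (xs ys : List Int) (l : Int) :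
    pvFA (xs ++ ys) l = pvFA ys (pvFA xs l) := by
  simp [pvFA, List.foldl_append]

theorem pvFA_nonpos (xs : List Int) (h : ∀ x ∈ xs, x ≤ 0) : pvFA xs 0 = 0 := by
  induction xs with
  | nil => rfl
  | cons x t ih =>
    have hx : x ≤ 0 := h x (by simp)
    simp only [pvFA, List.foldl_cons]
    have : ¬ (x > 0) := by omega
    simp only [this, if_false]
    exact ih (fun y hy => h y (by simp [hy]))

theorem pvFA_clamp (xs : List Int) (l m : Int) (h : l + xs.length ≤ m) :
    pvFA xs l = pvFA (xs.map (fun x => min x m)) l := by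
  induction xs generalizing l with
  | nil => rfl
  | cons x t ih =>
    simp only [List.map_cons, pvFA, List.foldl_cons]
    by_cases hxm : x ≤ m
    · have : min x m = x := by omega
      rw [this]
      by_cases hxl : x > l
      · simp only [hxl, if_true]
        exact ih (l + 1) (by simp at h ⊢; omega)
      · simp only [hxl, if_false]
        exact ih l (by simp at h ⊢; omega)
    · -- x > m: both x and min x m = m are greater than l
      have hmin : min x m = m := by omega
      have hlm : l < m := by simp at h; omega
      have h1 : x > l := by omega
      have h2 : m > l := hlm
      rw [hmin]
      simp only [h1, h2, if_true]
      exact ih (l + 1) (by simp at h ⊢; omega)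

theorem pvFA_replicate (c : Nat) (v l : Int) (h : l ≤ v) :
    pvFA (List.replicate c v) l = min v (l + c) := by
  induction c generalizing l with
  | zero => simp [pvFA]; omega
  | succ k ih =>
    simp only [List.replicate_succ, pvFA, List.foldl_cons]
    by_cases hv : v > l
    · simp only [hv, if_true]
      have := ih (l + 1) (by omega)
      simp only [pvFA] at this
      rw [this]; push_cast; omega
    · have hlv : l = v := by omega
      simp only [hv, if_false]
      have := ih l h
      simp only [pvFA] at this
      rw [this]; push_cast; omega

-- sorted s splits into the sorted nonpositives followed by the sorted positives
theorem pv_sorted_split (s : List Int) :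
    PySem.List.sorted s (fun x => x) =
      PySem.List.sorted (s.filter (fun x => decide (x ≤ 0))) (fun x => x) ++
      PySem.List.sorted (s.filter (fun x => !decide (x ≤ 0))) (fun x => x) := by
  apply PySem.List.sorted_id_eq_of_perm_of_pairwise
  · exact ((PySem.List.sorted_perm _ _ _).append (PySem.List.sorted_perm _ _ _)).trans
      (List.filter_append_perm _ s)
  · rw [List.pairwise_append]
    refine ⟨PySem.List.sorted_pairwise _ _, PySem.List.sorted_pairwise _ _, ?_⟩
    intro a ha b hb
    have ha' := (PySem.List.mem_sorted _ _ _ _).1 ha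
    have hb' := (PySem.List.mem_sorted _ _ _ _).1 hb
    have h1 : a ≤ 0 := by simpa using (List.mem_filter.1 ha').2
    have h2 : ¬ b ≤ 0 := by simpa using (List.mem_filter.1 hb').2
    omega

-- mapping the monotone clamp through sorted = sorted of the mapped list
theorem pv_sorted_map_clamp (P : List Int) (m : Int) :
    (PySem.List.sorted P (fun x => x)).map (fun x => min x m) =
      PySem.List.sorted (P.map (fun x => min x m)) (fun x => x) := by
  symm
  apply PySem.List.sorted_id_eq_of_perm_of_pairwise
  · exact (PySem.List.sorted_perm P _ _).map _
  · exact List.Pairwise.map _ (fun a b hab => by simp at hab ⊢; omega)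
      (PySem.List.sorted_pairwise P _)

-- block decomposition: each element of pvBlocks u (1+j) lies in [1, j], and it is sorted
theorem pv_blocks_mem_pairwise (u : List Int) (j : Nat) :
    (∀ x ∈ pvBlocks u (1 + j), 1 ≤ x ∧ x < 1 + (j : Int)) ∧
      List.Pairwise (· ≤ ·) (pvBlocks u (1 + j)) := by
  induction j with
  | zero =>
    simp [pvBlocks, PySem.List.pyRange_one_eq_nil (by omega : (1:Int) ≤ 1)]
  | succ k ih =>
    have hstep : (1 + ((k : Int) + 1)) = (1 + (k : Int)) + 1 := by ring
    have hrange : PySem.List.pyRange 1 (1 + ((k:Nat) + 1 : Nat) : Int) 1 =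
        PySem.List.pyRange 1 (1 + (k : Int)) 1 ++ [1 + (k : Int)] := by
      push_cast
      rw [hstep, PySem.List.pyRange_one_succ_right (by omega)]
    have hb : pvBlocks u (1 + ((k : Nat) + 1 : Nat) : Int) =
        pvBlocks u (1 + (k : Int)) ++ List.replicate (u.count (1 + (k : Int))) (1 + (k : Int)) := by
      simp only [pvBlocks]
      rw [hrange, List.flatMap_append]
      simp
    constructor
    · intro x hx
      rw [hb, List.mem_append] at hx
      rcases hx with hx | hx
      · have := ih.1 x hx
        push_cast; omega
      · have := List.eq_of_mem_replicate hx
        push_cast; omega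
    · rw [hb, List.pairwise_append]
      refine ⟨ih.2, List.pairwise_replicate.2 (by simp), ?_⟩
      intro a ha b hb'
      have h1 := (ih.1 a ha).2
      have h2 := List.eq_of_mem_replicate hb'
      omega

-- the blocks are a permutation of the elements below the bound
theorem pv_blocks_perm (u : List Int) (hu : ∀ x ∈ u, 1 ≤ x) (j : Nat) :
    (pvBlocks u (1 + j)).Perm (u.filter (fun x => decide (x < 1 + (j : Int)))) := by
  induction j with
  | zero =>
    have h1 : pvBlocks u (1 + (0:Nat)) = [] := by
      simp [pvBlocks, PySem.List.pyRange_one_eq_nil (by omega : (1:Int) ≤ 1)]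
    have h2 : u.filter (fun x => decide (x < 1 + ((0:Nat) : Int))) = [] := by
      rw [List.filter_eq_nil_iff]
      intro x hx
      have := hu x hx
      simp; omega
    rw [h1, h2]
  | succ k ih =>
    have hstep : (1 + ((k : Int) + 1)) = (1 + (k : Int)) + 1 := by ring
    have hrange : PySem.List.pyRange 1 (1 + ((k:Nat) + 1 : Nat) : Int) 1 =
        PySem.List.pyRange 1 (1 + (k : Int)) 1 ++ [1 + (k : Int)] := by
      push_cast
      rw [hstep, PySem.List.pyRange_one_succ_right (by omega)]
    have hb : pvBlocks u (1 + ((k : Nat) + 1 : Nat) : Int) =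
        pvBlocks u (1 + (k : Int)) ++ List.replicate (u.count (1 + (k : Int))) (1 + (k : Int)) := by
      simp only [pvBlocks]
      rw [hrange, List.flatMap_append]
      simp
    rw [hb]
    -- u.filter (< b+1) ~ u.filter (< b) ++ u.filter (== b), with b = 1 + k
    set b : Int := 1 + (k : Int) with hbdef
    have hsplit : (u.filter (fun x => decide (x < b + 1))).Perm
        (u.filter (fun x => decide (x < b)) ++ u.filter (fun x => x == b)) := by
      have hp := List.filter_append_perm (fun x => decide (x < b))
        (u.filter (fun x => decide (x < b + 1)))
      have e1 : (u.filter (fun x => decide (x < b + 1))).filter (fun x => decide (x < b)) =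
          u.filter (fun x => decide (x < b)) := by
        rw [List.filter_filter]
        apply List.filter_congr
        intro x _
        by_cases hxb : x < b
        · have h1 : x < b + 1 := by omega
          simp [hxb, h1]
        · simp [hxb]
      have e2 : (u.filter (fun x => decide (x < b + 1))).filter (fun x => !decide (x < b)) =
          u.filter (fun x => x == b) := by
        rw [List.filter_filter]
        apply List.filter_congr
        intro x _
        by_cases hxb : x < b
        · have hxb1 : ¬ x = b := by omega
          simp [hxb, hxb1]
        · by_cases hxb1 : x = b
          · simp [hxb1]
          · have h1 : ¬ x < b + 1 := by omega
            simp [hxb, hxb1, h1]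
      rw [e1, e2] at hp
      exact hp.symm
    have hrep : List.replicate (u.count b) b = u.filter (fun x => x == b) :=
      (List.filter_beq b).symm
    have hgoal : (pvBlocks u b ++ List.replicate (u.count b) b).Perm
        (u.filter (fun x => decide (x < b)) ++ u.filter (fun x => x == b)) := by
      rw [hrep]
      exact ih.append_right _
    have hcast : ((1:Int) + ((k:Nat) + 1 : Nat)) = b + 1 := by push_cast; omega
    rw [hcast]
    exact hgoal.trans hsplit.symm

-- fold of A over the blocks equals B's greedy sweep, which stays ≤ j
theorem pv_fold_blocks (u : List Int) (j : Nat) :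
    pvFA (pvBlocks u (1 + j)) 0 = pvBf u (1 + j) ∧ pvBf u (1 + j) ≤ (j : Int) := by
  induction j with
  | zero =>
    constructor <;>
      simp [pvBlocks, pvBf, pvFA, PySem.List.pyRange_one_eq_nil (by omega : (1:Int) ≤ 1)]
  | succ k ih =>
    have hrange : PySem.List.pyRange 1 (1 + ((k:Nat) + 1 : Nat) : Int) 1 =
        PySem.List.pyRange 1 (1 + (k : Int)) 1 ++ [1 + (k : Int)] := by
      push_cast
      rw [(by ring : (1 + ((k : Int) + 1)) = (1 + (k : Int)) + 1),
        PySem.List.pyRange_one_succ_right (by omega)]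
    have hb : pvBlocks u (1 + ((k : Nat) + 1 : Nat) : Int) =
        pvBlocks u (1 + (k : Int)) ++ List.replicate (u.count (1 + (k : Int))) (1 + (k : Int)) := by
      simp only [pvBlocks]
      rw [hrange, List.flatMap_append]
      simp
    have hf : pvBf u (1 + ((k:Nat) + 1 : Nat) : Int) =
        min (1 + (k : Int)) (pvBf u (1 + (k : Int)) + (u.count (1 + (k : Int)) : Int)) := by
      simp only [pvBf]
      rw [hrange, List.foldl_append]
      simp
    constructor
    · rw [hb, pvFA_append, ih.1, hf]
      exact pvFA_replicate _ _ _ (by have := ih.2; omega)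
    · rw [hf]
      push_cast
      omega

-- B's dict of counts is Counter(keys); its lookups are list counts
theorem pv_alt_eq_pvBf (n : Int) (s : List Int) :
    getLongestStraight_alt n s =
      pvBf ((s.filter (fun side => decide (1 ≤ side))).map (fun side => min side (s.length : Int)))
        ((s.length : Int) + 1) := by
  unfold getLongestStraight_alt pvBf
  have hc : (((s.filter (fun side => decide (1 ≤ side))).map (fun side => min side (s.length : Int))).foldl
      (fun d k => d.modify k 0 (fun x => x + 1)) (PySem.Dict.empty : PySem.Dict Int Int)) =
      PySem.Dict.counter ((s.filter (fun side => decide (1 ≤ side))).map (fun side => min side (s.length : Int))) :=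
    (PySem.Dict.counter_eq_foldl _).symm
  simp only [hc, PySem.Dict.getD_counter]

-- ===== VERDICT (by name: the statement is the Claim_ definition above) =====
theorem getLongestStraight_spec : Claim_equal_getLongestStraight := by
  unfold Claim_equal_getLongestStraight
  intro n s _
  unfold Spec_getLongestStraight
  rw [pv_alt_eq_pvBf]
  have hfilter : s.filter (fun x => !decide (x ≤ 0)) = s.filter (fun side => decide (1 ≤ side)) :=
    List.filter_congr (fun x _ => by by_cases hx : x ≤ 0 <;> simp [hx] <;> omega)
  have hA : getLongestStraight n s = pvFA (PySem.List.sorted s (fun x => x)) 0 := rfl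
  rw [hA, pv_sorted_split s, pvFA_append, hfilter]
  -- the nonpositive prefix leaves l = 0
  have h0 : pvFA (PySem.List.sorted (s.filter (fun x => decide (x ≤ 0))) (fun x => x)) 0 = 0 := by
    apply pvFA_nonpos
    intro x hx
    have := (PySem.List.mem_sorted _ _ _ _).1 hx
    simpa using (List.mem_filter.1 this).2
  rw [h0]
  -- clamp the positive sides to m = len(s)
  have hlen : (0 : Int) +
      ((PySem.List.sorted (s.filter (fun side => decide (1 ≤ side))) (fun x => x)).length : Int) ≤
      (s.length : Int) := by
    rw [PySem.List.length_sorted]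
    have := List.length_filter_le (fun side => decide (1 ≤ side)) s
    omega
  rw [pvFA_clamp _ 0 (s.length : Int) hlen, pv_sorted_map_clamp]
  -- decompose the sorted clamped positives into count blocks
  have humem : ∀ x ∈ (s.filter (fun side => decide (1 ≤ side))).map
      (fun x => min x (s.length : Int)), 1 ≤ x ∧ x ≤ (s.length : Int) := by
    intro x hx
    obtain ⟨p, hp, rfl⟩ := List.mem_map.1 hx
    have hp1 : 1 ≤ p := by
      have := (List.mem_filter.1 hp).2
      simpa using this
    have hm1 : (1 : Int) ≤ (s.length : Int) := by
      have hmem : p ∈ s := (List.mem_filter.1 hp).1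
      have : 0 < s.length := List.length_pos_of_mem hmem
      omega
    exact ⟨by omega, by omega⟩
  have hsorted_blocks :
      PySem.List.sorted ((s.filter (fun side => decide (1 ≤ side))).map
        (fun x => min x (s.length : Int))) (fun x => x) =
      pvBlocks ((s.filter (fun side => decide (1 ≤ side))).map
        (fun x => min x (s.length : Int))) (1 + (s.length : Nat)) := by
    apply PySem.List.sorted_id_eq_of_perm_of_pairwise
    · have hperm := pv_blocks_perm _ (fun x hx => (humem x hx).1) s.length
      have hfull : ((s.filter (fun side => decide (1 ≤ side))).map
          (fun x => min x (s.length : Int))).filter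
          (fun x => decide (x < 1 + ((s.length : Nat) : Int))) =
          (s.filter (fun side => decide (1 ≤ side))).map (fun x => min x (s.length : Int)) := by
        apply List.filter_eq_self.2
        intro x hx
        have := humem x hx
        simp
        omega
      rw [hfull] at hperm
      exact hperm
    · exact (pv_blocks_mem_pairwise _ s.length).2
  rw [hsorted_blocks, (pv_fold_blocks _ s.length).1]
  exact congrArg (pvBf _) (by omega)
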